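-- pv_equiv track=rewrite | github.com/RJPenic/OSALG | scripts/stats_calc.py | get_ref_ind
-- ===== SOURCE A (Python) =====
-- def get_ref_ind(refs, pos):
--     i = 0
--     sum = 0
--
--     for ref in refs:
--         sum += len(ref)
--
--         if pos < sum:
--             break
--
--         i += 1
--
--     return i
-- ===== SOURCE B (Python) =====
-- from itertools import accumulate
-- from bisect import bisect_right
--
-- def get_ref_ind(refs, pos):
--     cum = list(accumulate(len(r) for r in refs))
--     return bisect_right(cum, pos)
-- ===== Notes on version B (the rewrite author's own statement) =====
-- stated objective: idiomatic
-- what changed: Replaces the early-breaking linear scan with building the prefix-sum table via itertools.accumulate and locating the index with bisect_right.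
import Mathlib
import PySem

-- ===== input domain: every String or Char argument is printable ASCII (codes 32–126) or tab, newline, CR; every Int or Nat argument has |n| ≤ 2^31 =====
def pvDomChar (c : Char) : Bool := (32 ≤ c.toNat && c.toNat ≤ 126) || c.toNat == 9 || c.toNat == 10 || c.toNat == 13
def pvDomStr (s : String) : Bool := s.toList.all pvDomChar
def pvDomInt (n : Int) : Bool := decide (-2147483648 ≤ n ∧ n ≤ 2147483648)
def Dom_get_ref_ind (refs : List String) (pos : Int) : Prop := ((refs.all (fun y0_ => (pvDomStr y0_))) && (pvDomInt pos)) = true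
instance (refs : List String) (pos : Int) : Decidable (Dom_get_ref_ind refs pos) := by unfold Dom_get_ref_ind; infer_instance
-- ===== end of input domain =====

-- B replaces A's early-breaking linear scan by building the prefix-sum table and binary-searching it (idiomatic; same asymptotic cost).

-- ===== PORT A =====
-- the for-loop with its break, carrying (i, sum) exactly as A does
def getRefIndLoop (pos : Int) : List String → Int → Int → Int
  | [], i, _ => i
  | ref :: rest, i, sum =>
    let sum := sum + PySem.Str.len ref
    if pos < sum then i else getRefIndLoop pos rest (i + 1) sum

def get_ref_ind (refs : List String) (pos : Int) : Int :=
  getRefIndLoop pos refs 0 0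

-- ===== PORT B =====
-- cum = list(accumulate(len(r) for r in refs))
def cumLens : List String → Int → List Int
  | [], _ => []
  | r :: rest, acc =>
    let s := acc + PySem.Str.len r
    s :: cumLens rest s

-- bisect.bisect_right(cum, pos): the insertion point in the sorted list cum,
-- i.e. the number of elements ≤ pos (exact here: cum is nondecreasing since lengths are ≥ 0)
def bisectRight (cum : List Int) (pos : Int) : Int :=
  (cum.countP (fun s => decide (s ≤ pos)) : Nat)

def get_ref_ind_alt (refs : List String) (pos : Int) : Int :=
  bisectRight (cumLens refs 0) pos

-- ===== PRECONDITION & SPEC =====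
def Spec_get_ref_ind (refs : List String) (pos : Int) (out : Int) : Prop := out = get_ref_ind_alt refs pos
instance (refs : List String) (pos : Int) (out : Int) : Decidable (Spec_get_ref_ind refs pos out) := by unfold Spec_get_ref_ind; infer_instance

-- ===== CLAIM (what is proved, stated in full; the proofs are below) =====
def Claim_equal_get_ref_ind : Prop := ∀ (refs : List String) (pos : Int), Dom_get_ref_ind refs pos → Spec_get_ref_ind refs pos (get_ref_ind refs pos)

-- ===== LEMMAS AND PROOFS =====

lemma cumLens_ge (rest : List String) (acc : Int) :
    ∀ x ∈ cumLens rest acc, acc ≤ x := by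
  induction rest generalizing acc with
  | nil => simp [cumLens]
  | cons r t ih =>
    intro x hx
    simp only [cumLens, PySem.Str.len_eq, List.mem_cons] at hx
    have hlen : (0 : Int) ≤ (r.toList.length : Int) := Int.natCast_nonneg _
    rcases hx with h | h
    · omega
    · have := ih (acc + (r.toList.length : Int)) x h
      omega

lemma loop_eq_count (pos : Int) (rest : List String) (i sum : Int) :
    getRefIndLoop pos rest i sum =
      i + ((cumLens rest sum).countP (fun s => decide (s ≤ pos)) : Nat) := by
  induction rest generalizing i sum with
  | nil => simp [getRefIndLoop, cumLens]
  | cons r t ih =>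
    simp only [getRefIndLoop, cumLens, PySem.Str.len_eq]
    by_cases h : pos < sum + (r.toList.length : Int)
    · have hz : (cumLens t (sum + (r.toList.length : Int))).countP (fun s => decide (s ≤ pos)) = 0 := by
        rw [List.countP_eq_zero]
        intro x hx
        have := cumLens_ge t (sum + (r.toList.length : Int)) x hx
        simp only [decide_eq_true_eq]
        omega
      rw [if_pos h, List.countP_cons_of_neg (by simp only [decide_eq_true_eq]; omega), hz]
      omega
    · rw [if_neg h, ih, List.countP_cons_of_pos (by simp only [decide_eq_true_eq]; omega)]
      omega

-- ===== VERDICT (by name: the statement is the Claim_ definition above) =====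
theorem get_ref_ind_spec : Claim_equal_get_ref_ind := by
  intro refs pos _
  show get_ref_ind refs pos = get_ref_ind_alt refs pos
  rw [get_ref_ind, get_ref_ind_alt, bisectRight, loop_eq_count]
  omega
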